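-- pv_equiv track=rewrite | github.com/idealism-xxm/scripts | Python/invert_qrcode_content.py | resize_and_refill
-- ===== SOURCE A (Python) =====
-- from typing import List
--
-- def refill_bit(image_matrix: List[List[int]], bit_length: int, r: int, c, value: int):
--     """用 value 填充以 (r, c) 为左上角的一位"""
--     for i in range(r, r + bit_length):
--         for j in range(c, c + bit_length):
--             image_matrix[i][j] = value
--
-- def refill_with_0_and_255(image_matrix: List[List[int]], bit_length: int):
--     """只用 0 和 255 重新填充"""
--     for r in range(0, len(image_matrix), bit_length):
--         for c in range(0, len(image_matrix[r]), bit_length):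
--             # 取中间一点的值作为填充值
--             value = image_matrix[r + bit_length // 2][c + bit_length // 2]
--             refill_bit(image_matrix, bit_length, r, c, value)
--
-- def resize_and_refill(image_matrix: List[List[int]], bit_length: int) -> List[List[int]]:
--     """缩放图片大小，长宽能够整除 bit_length，并重新填色"""
--     height = len(image_matrix) // bit_length * bit_length
--     width = len(image_matrix[0]) // bit_length * bit_length
--     image_matrix = image_matrix[:height]
--     for i in range(height):
--         image_matrix[i] = image_matrix[i][:width]
--
--     refill_with_0_and_255(image_matrix, bit_length)
--     return image_matrix
-- ===== SOURCE B (Python) =====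
-- from typing import List
--
-- def resize_and_refill(image_matrix: List[List[int]], bit_length: int) -> List[List[int]]:
--     """Build the cropped-and-refilled image in one pass: each output cell is the
--     center pixel of its block, read directly from the input (no mutation)."""
--     height = len(image_matrix) // bit_length * bit_length
--     width = len(image_matrix[0]) // bit_length * bit_length
--     half = bit_length // 2
--     return [
--         [image_matrix[i // bit_length * bit_length + half][j // bit_length * bit_length + half]
--          for j in range(width)]
--         for i in range(height)
--     ]
-- ===== Notes on version B (the rewrite author's own statement) =====
-- stated objective: simpler
-- what changed: Replaces A's crop-then-mutate pipeline (slice, per-row crop, two-level block fill via two helper functions writing every cell in place) by a single non-mutating comprehension that computes each output cell directly as the center pixel of its block.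
-- outside the precondition, e.g. on resize_and_refill([[1, 2], [3, 4]], -2): A returns [[1, 2], [3, 4]], B returns [[4, 4], [4, 4]]; on resize_and_refill([[1, 2], [3]], 1): A returns [[1, 2], [3]], B raises IndexError
import Mathlib
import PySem

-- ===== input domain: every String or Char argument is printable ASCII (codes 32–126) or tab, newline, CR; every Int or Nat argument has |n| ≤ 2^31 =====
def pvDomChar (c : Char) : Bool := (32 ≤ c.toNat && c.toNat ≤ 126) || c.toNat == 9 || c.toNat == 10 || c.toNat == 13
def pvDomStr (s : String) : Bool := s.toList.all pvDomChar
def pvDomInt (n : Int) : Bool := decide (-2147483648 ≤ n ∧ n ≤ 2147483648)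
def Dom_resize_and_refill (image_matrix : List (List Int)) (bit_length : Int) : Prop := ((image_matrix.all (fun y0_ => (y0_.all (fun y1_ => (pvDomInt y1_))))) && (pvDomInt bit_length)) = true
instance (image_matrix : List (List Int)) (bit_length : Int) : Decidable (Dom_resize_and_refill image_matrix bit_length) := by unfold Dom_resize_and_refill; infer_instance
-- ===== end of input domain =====

-- B replaces A's crop-then-refill-in-place pipeline by one non-mutating pass that reads each
-- output cell directly as its block's center pixel (objective: simpler).  Return values only:
-- neither program mutates the caller's matrix (A mutates only fresh lists made by its slices).

-- ===== PORT A =====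
-- image_matrix[i][j] ; exact where Pre_ keeps both indices nonnegative and in range
-- (Python raises IndexError outside; Pre_ excludes those inputs)
def pyCellGet (m : List (List Int)) (i j : Int) : Int :=
  PySem.List.pyGetD (PySem.List.pyGetD m i []) j 0

-- image_matrix[i][j] = v ; exact where Pre_ keeps both indices nonnegative and in range
def pyCellSet (m : List (List Int)) (i j : Int) (v : Int) : List (List Int) :=
  PySem.List.pySetD m i (PySem.List.pySetD (PySem.List.pyGetD m i []) j v)

def refill_bit (image_matrix : List (List Int)) (bit_length r c v : Int) : List (List Int) :=
  (PySem.List.pyRange r (r + bit_length) 1).foldl (fun acc i =>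
    (PySem.List.pyRange c (c + bit_length) 1).foldl (fun acc2 j =>
      pyCellSet acc2 i j v) acc) image_matrix

def refill_with_0_and_255 (image_matrix : List (List Int)) (bit_length : Int) : List (List Int) :=
  (PySem.List.pyRange 0 image_matrix.length bit_length).foldl (fun acc r =>
    (PySem.List.pyRange 0 (PySem.List.pyGetD acc r []).length bit_length).foldl (fun acc2 c =>
      refill_bit acc2 bit_length r c
        (pyCellGet acc2 (r + PySem.Int.floordiv bit_length 2) (c + PySem.Int.floordiv bit_length 2))) acc)
    image_matrix

def resize_and_refill (image_matrix : List (List Int)) (bit_length : Int) : List (List Int) :=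
  let height := PySem.Int.floordiv image_matrix.length bit_length * bit_length
  let width := PySem.Int.floordiv (PySem.List.pyGetD image_matrix 0 []).length bit_length * bit_length
  let cropped := PySem.List.slice image_matrix none (some height)
  let cropped2 := (PySem.List.pyRange 0 height 1).foldl
      (fun acc i => PySem.List.pySetD acc i
        (PySem.List.slice (PySem.List.pyGetD acc i []) none (some width))) cropped
  refill_with_0_and_255 cropped2 bit_length

-- ===== PORT B =====
def resize_and_refill_alt (image_matrix : List (List Int)) (bit_length : Int) : List (List Int) :=
  let height := PySem.Int.floordiv image_matrix.length bit_length * bit_length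
  let width := PySem.Int.floordiv (PySem.List.pyGetD image_matrix 0 []).length bit_length * bit_length
  let half := PySem.Int.floordiv bit_length 2
  (PySem.List.pyRange 0 height 1).map (fun i =>
    (PySem.List.pyRange 0 width 1).map (fun j =>
      PySem.List.pyGetD
        (PySem.List.pyGetD image_matrix (PySem.Int.floordiv i bit_length * bit_length + half) [])
        (PySem.Int.floordiv j bit_length * bit_length + half) 0))

-- ===== PRECONDITION & SPEC =====
-- Pre_ excludes: non-positive bit_length (outside the natural domain; for a negative bit_length
-- A's unchanged-matrix return is an accident of empty ranges), the empty matrix (A raises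
-- IndexError on image_matrix[0]), and ragged inputs where one of the first `height` rows is
-- shorter than `width` (outside the natural rectangular-image domain; A raises IndexError there
-- except in degenerate cases where it skips blocks, and B itself raises IndexError there).
def Pre_resize_and_refill (image_matrix : List (List Int)) (bit_length : Int) : Prop :=
  1 ≤ bit_length ∧ image_matrix ≠ [] ∧
  ∀ row ∈ image_matrix.take (image_matrix.length / bit_length.toNat * bit_length.toNat),
    (image_matrix.headD []).length / bit_length.toNat * bit_length.toNat ≤ row.length

instance (image_matrix : List (List Int)) (bit_length : Int) : Decidable (Pre_resize_and_refill image_matrix bit_length) := by unfold Pre_resize_and_refill; infer_instance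

def pvWitness_resize_and_refill : List (List Int) × Int := ([[7, 2], [3, 250]], 2)

def Spec_resize_and_refill (image_matrix : List (List Int)) (bit_length : Int) (out : List (List Int)) : Prop := out = resize_and_refill_alt image_matrix bit_length
instance (image_matrix : List (List Int)) (bit_length : Int) (out : List (List Int)) : Decidable (Spec_resize_and_refill image_matrix bit_length out) := by unfold Spec_resize_and_refill; infer_instance

-- ===== CLAIM (what is proved, stated in full; the proofs are below) =====
def Claim_equal_resize_and_refill : Prop := ∀ (image_matrix : List (List Int)) (bit_length : Int), Dom_resize_and_refill image_matrix bit_length → Pre_resize_and_refill image_matrix bit_length → Spec_resize_and_refill image_matrix bit_length (resize_and_refill image_matrix bit_length)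

-- ===== LEMMAS AND PROOFS =====

def rowFillN (row : List Int) (c k : Nat) (v : Int) : List Int :=
  (List.range k).foldl (fun acc t => acc.set (c + t) v) row

lemma length_rowFillN (row : List Int) (c k : Nat) (v : Int) :
    (rowFillN row c k v).length = row.length := by
  unfold rowFillN
  induction k with
  | zero => simp
  | succ n ih => rw [List.range_succ, List.foldl_append]; simp [ih]

lemma getElem?_rowFillN (row : List Int) (c k j : Nat) (v : Int) :
    (rowFillN row c k v)[j]? =
      if c ≤ j ∧ j < c + k ∧ j < row.length then some v else row[j]? := by
  induction k with
  | zero => simp [rowFillN]; intro h1 h2; omega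
  | succ n ih =>
    have h1 : rowFillN row c (n+1) v = (rowFillN row c n v).set (c+n) v := by
      unfold rowFillN; rw [List.range_succ, List.foldl_append]; rfl
    have hl := length_rowFillN row c n v
    rw [h1, List.getElem?_set, hl, ih]
    split_ifs <;> try rfl
    all_goals first | omega | exact (List.getElem?_eq_none (by omega)).symm

def matFillN (m : List (List Int)) (r c k bn : Nat) (v : Int) : List (List Int) :=
  (List.range k).foldl (fun acc t =>
    acc.set (r + t) (rowFillN (acc.getD (r + t) []) c bn v)) m

lemma length_matFillN (m : List (List Int)) (r c k bn : Nat) (v : Int) :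
    (matFillN m r c k bn v).length = m.length := by
  induction k with
  | zero => simp [matFillN]
  | succ n ih =>
    have h1 : matFillN m r c (n+1) bn v
        = (matFillN m r c n bn v).set (r+n)
            (rowFillN ((matFillN m r c n bn v).getD (r+n) []) c bn v) := by
      unfold matFillN; rw [List.range_succ, List.foldl_append]; rfl
    rw [h1, List.length_set]; exact ih

lemma getElem?_matFillN (m : List (List Int)) (r c k bn i : Nat) (v : Int) :
    (matFillN m r c k bn v)[i]? =
      if r ≤ i ∧ i < r + k then (m[i]?).map (fun row => rowFillN row c bn v)
      else m[i]? := by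
  induction k generalizing i with
  | zero => simp only [matFillN, List.range_zero, List.foldl_nil]; rw [if_neg (by omega)]
  | succ n ih =>
    have h1 : matFillN m r c (n+1) bn v
        = (matFillN m r c n bn v).set (r+n)
            (rowFillN ((matFillN m r c n bn v).getD (r+n) []) c bn v) := by
      unfold matFillN; rw [List.range_succ, List.foldl_append]; rfl
    have hl := length_matFillN m r c n bn v
    have hg : (matFillN m r c n bn v).getD (r+n) [] = m.getD (r+n) [] := by
      simp only [List.getD]
      rw [ih (r+n), if_neg (by omega)]
    rw [h1, List.getElem?_set, hl, hg, ih i]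
    by_cases hin : r + n < m.length
    · have hm : m.getD (r+n) [] = m[r+n] := List.getD_eq_getElem m [] hin
      split_ifs <;> try rfl
      all_goals try omega
      · -- i = r+n, in range: some (rowFill m[r+n]) = map rowFill m[i]?
        subst_vars; rw [hm, List.getElem?_eq_getElem hin]; rfl
    · have hm : m.getD (r+n) [] = [] := List.getD_eq_default _ _ (by omega)
      split_ifs <;> try rfl
      all_goals try omega
      · subst_vars
        rw [List.getElem?_eq_none (l := m) (by omega)]; rfl

lemma pyRange_natCast_add (a n : Nat) :
    PySem.List.pyRange (a : Int) ((a : Int) + (n : Int)) 1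
      = (List.range n).map (fun k => ((a + k : Nat) : Int)) := by
  rw [PySem.List.pyRange_of_pos _ _ (by norm_num)]
  have hc : (if (a:Int) < (a:Int)+(n:Int) then (((a:Int)+(n:Int)-(a:Int)+1-1)/1).toNat else 0) = n := by
    split_ifs with h
    · simp
    · omega
  rw [hc]
  apply List.map_congr_left
  intro k _
  push_cast; ring

lemma pyRange_step_natCast (H bn : Nat) (hb : 0 < bn) (hd : bn ∣ H) :
    PySem.List.pyRange 0 (H : Int) (bn : Int)
      = (List.range (H / bn)).map (fun k => ((bn * k : Nat) : Int)) := by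
  obtain ⟨q, rfl⟩ := hd
  rw [PySem.List.pyRange_of_pos _ _ (by exact_mod_cast hb)]
  have hc : (if (0:Int) < ((bn*q : Nat) : Int) then ((((bn*q:Nat):Int) - 0 + (bn:Int) - 1)/(bn:Int)).toNat else 0) = bn*q/bn := by
    rcases Nat.eq_zero_or_pos q with hq | hq
    · subst hq; simp
    · rw [if_pos (by push_cast; positivity)]
      have h1 : ((bn*q:Nat):Int) - 0 + (bn:Int) - 1 = ((bn:Int) - 1) + (q:Int) * (bn:Int) := by push_cast; ring
      rw [h1, Int.add_mul_ediv_right _ _ (by omega : (bn:Int) ≠ 0),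
        Int.ediv_eq_zero_of_lt (by omega) (by omega)]
      simp [Nat.mul_div_cancel_left q hb]
  rw [hc]
  apply List.map_congr_left
  intro k _
  push_cast; ring

lemma foldl_set_same (m : List (List Int)) (i c k : Nat) (v : Int) :
    (List.range k).foldl (fun acc u => acc.set i ((acc.getD i []).set (c+u) v)) m
      = m.set i (rowFillN (m.getD i []) c k v) := by
  induction k with
  | zero =>
    have h0 : rowFillN (m.getD i []) c 0 v = m.getD i [] := by simp [rowFillN]
    rw [List.range_zero, List.foldl_nil, h0]
    apply List.ext_getElem?
    intro j
    rw [List.getElem?_set]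
    split_ifs with h1 h2
    · subst h1; rw [List.getD_eq_getElem _ _ h2, List.getElem?_eq_getElem h2]
    · subst h1; exact List.getElem?_eq_none (by omega)
    · rfl
  | succ n ih =>
    rw [List.range_succ, List.foldl_append, List.foldl_cons, List.foldl_nil, ih,
      List.set_set]
    have hrow : rowFillN (m.getD i []) c (n+1) v = (rowFillN (m.getD i []) c n v).set (c+n) v := by
      unfold rowFillN; rw [List.range_succ, List.foldl_append]; rfl
    rw [hrow]
    congr 1
    by_cases hi : i < m.length
    · congr 1
      simp only [List.getD]
      rw [List.getElem?_set, if_pos rfl, if_pos hi]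
      rfl
    · have hm : m.getD i [] = [] := List.getD_eq_default _ _ (by omega)
      have hR : rowFillN (m.getD i []) c n v = [] := by
        rw [hm]
        have := length_rowFillN ([] : List Int) c n v
        exact List.length_eq_zero_iff.mp (by simpa using this)
      have hms : m.set i ([] : List Int) = m := List.set_eq_of_length_le (by omega)
      rw [hR, hms, List.getD_eq_default _ _ (by omega)]

lemma refill_bit_eq_matFillN (m : List (List Int)) (bn r c : Nat) (v : Int) :
    refill_bit m (bn : Int) (r : Int) (c : Int) v = matFillN m r c bn bn v := by
  unfold refill_bit
  rw [pyRange_natCast_add r bn, pyRange_natCast_add c bn, List.foldl_map]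
  unfold matFillN
  congr 1
  funext acc t
  rw [List.foldl_map]
  have : ∀ acc2 (u : Nat), pyCellSet acc2 ((r+t : Nat) : Int) ((c+u : Nat) : Int) v
      = acc2.set (r+t) ((acc2.getD (r+t) []).set (c+u) v) := by
    intro acc2 u
    unfold pyCellSet
    simp only [PySem.List.pyGetD_natCast, PySem.List.pySetD_natCast]
  simp only [this]
  exact foldl_set_same acc (r+t) c bn v

def cellN (m : List (List Int)) (i j : Nat) : Int := (m.getD i []).getD j 0

lemma getD_rowFillN (row : List Int) (c k j : Nat) (v : Int) :
    (rowFillN row c k v).getD j 0 =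
      if c ≤ j ∧ j < c + k ∧ j < row.length then v else row.getD j 0 := by
  simp only [List.getD, getElem?_rowFillN]
  split_ifs <;> rfl

lemma rowGetD_matFillN (m : List (List Int)) (r c bn i : Nat) (v : Int) :
    (matFillN m r c bn bn v).getD i [] =
      if r ≤ i ∧ i < r + bn ∧ i < m.length then rowFillN (m.getD i []) c bn v
      else m.getD i [] := by
  simp only [List.getD, getElem?_matFillN]
  by_cases h1 : r ≤ i ∧ i < r + bn
  · rw [if_pos h1]
    by_cases h2 : i < m.length
    · rw [if_pos ⟨h1.1, h1.2, h2⟩, List.getElem?_eq_getElem h2]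
      simp
    · rw [if_neg (by tauto), List.getElem?_eq_none (by omega)]
      rfl
  · rw [if_neg h1, if_neg (by tauto)]

lemma rowLen_matFillN (m : List (List Int)) (r c bn i : Nat) (v : Int) :
    ((matFillN m r c bn bn v).getD i []).length = (m.getD i []).length := by
  rw [rowGetD_matFillN]
  split_ifs with h
  · exact length_rowFillN _ _ _ _
  · rfl

lemma cellN_matFillN (m : List (List Int)) (r c bn i j : Nat) (v : Int)
    (hi : i < m.length) (hj : j < (m.getD i []).length) :
    cellN (matFillN m r c bn bn v) i j =
      if r ≤ i ∧ i < r + bn ∧ c ≤ j ∧ j < c + bn then v else cellN m i j := by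
  unfold cellN
  rw [rowGetD_matFillN]
  by_cases h1 : r ≤ i ∧ i < r + bn
  · rw [if_pos ⟨h1.1, h1.2, hi⟩, getD_rowFillN]
    by_cases h2 : c ≤ j ∧ j < c + bn
    · rw [if_pos ⟨h2.1, h2.2, hj⟩, if_pos ⟨h1.1, h1.2, h2.1, h2.2⟩]
    · rw [if_neg (by tauto), if_neg (by tauto)]
  · rw [if_neg (show ¬(r ≤ i ∧ i < r + bn ∧ i < m.length) by tauto),
      if_neg (by tauto)]

def tgtN (M : List (List Int)) (bn i j : Nat) : Int :=
  cellN M (i / bn * bn + bn / 2) (j / bn * bn + bn / 2)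

lemma tgt_block (M : List (List Int)) (bn i j p q : Nat)
    (hi1 : bn * p ≤ i) (hi2 : i < bn * (p + 1))
    (hj1 : bn * q ≤ j) (hj2 : j < bn * (q + 1)) :
    tgtN M bn i j = cellN M (bn * p + bn / 2) (bn * q + bn / 2) := by
  unfold tgtN
  have hip : i / bn = p :=
    Nat.div_eq_of_lt_le (by rw [Nat.mul_comm]; exact hi1) (by rw [Nat.mul_comm]; exact hi2)
  have hjq : j / bn = q :=
    Nat.div_eq_of_lt_le (by rw [Nat.mul_comm]; exact hj1) (by rw [Nat.mul_comm]; exact hj2)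
  rw [hip, hjq, Nat.mul_comm p bn, Nat.mul_comm q bn]

lemma pyCellGet_natCast (m : List (List Int)) (i j : Nat) :
    pyCellGet m (i : Int) (j : Int) = cellN m i j := by
  unfold pyCellGet cellN
  simp [PySem.List.pyGetD_natCast]

lemma half_natCast (bn : Nat) :
    PySem.Int.floordiv (bn : Int) 2 = ((bn / 2 : Nat) : Int) := by
  exact_mod_cast PySem.Int.floordiv_natCast bn 2

def innerFoldA (S : List (List Int)) (bn r q : Nat) : List (List Int) :=
  (List.range q).foldl (fun acc k =>
    refill_bit acc (bn : Int) (r : Int) ((bn * k : Nat) : Int)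
      (pyCellGet acc ((r : Int) + PySem.Int.floordiv (bn : Int) 2)
        (((bn * k : Nat) : Int) + PySem.Int.floordiv (bn : Int) 2))) S

lemma inner_fold (M S : List (List Int)) (bn p W q : Nat) (hb : 0 < bn)
    (hplen : bn * (p + 1) ≤ M.length)
    (hrowsM : ∀ i, i < M.length → (M.getD i []).length = W)
    (hq : bn * q ≤ W)
    (hS1 : S.length = M.length)
    (hS2 : ∀ i, (S.getD i []).length = (M.getD i []).length)
    (hS3 : ∀ i j, i < M.length → j < W →
      cellN S i j = if i < bn * p then tgtN M bn i j else cellN M i j) :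
    (innerFoldA S bn (bn * p) q).length = M.length ∧
    (∀ i, ((innerFoldA S bn (bn * p) q).getD i []).length = (M.getD i []).length) ∧
    (∀ i j, i < M.length → j < W → cellN (innerFoldA S bn (bn * p) q) i j =
      if i < bn * p then tgtN M bn i j
      else if i < bn * (p + 1) ∧ j < bn * q then tgtN M bn i j
      else cellN M i j) := by
  have e1 : bn * (p + 1) = bn * p + bn := by ring
  induction q with
  | zero =>
    refine ⟨hS1, hS2, ?_⟩
    intro i j hi hj
    unfold innerFoldA
    rw [List.range_zero, List.foldl_nil, hS3 i j hi hj]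
    by_cases h1 : i < bn * p
    · simp [h1]
    · rw [if_neg h1, if_neg h1, if_neg (by omega)]
  | succ q ih =>
    have e2 : bn * (q + 1) = bn * q + bn := by ring
    obtain ⟨ih1, ih2, ih3⟩ := ih (by omega)
    set T := innerFoldA S bn (bn * p) q with hTdef
    have hT' : innerFoldA S bn (bn * p) (q + 1)
        = refill_bit T (bn : Int) ((bn * p : Nat) : Int) ((bn * q : Nat) : Int)
            (pyCellGet T (((bn * p : Nat) : Int) + PySem.Int.floordiv (bn : Int) 2)
              (((bn * q : Nat) : Int) + PySem.Int.floordiv (bn : Int) 2)) := by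
      unfold innerFoldA; rw [List.range_succ, List.foldl_append]; rfl
    have hv : pyCellGet T (((bn * p : Nat) : Int) + PySem.Int.floordiv (bn : Int) 2)
              (((bn * q : Nat) : Int) + PySem.Int.floordiv (bn : Int) 2)
        = cellN M (bn * p + bn / 2) (bn * q + bn / 2) := by
      rw [half_natCast, ← Nat.cast_add, ← Nat.cast_add, pyCellGet_natCast]
      have hdiv : bn / 2 < bn := Nat.div_lt_self hb (by omega)
      rw [ih3 (bn * p + bn / 2) (bn * q + bn / 2) (by omega) (by omega)]
      rw [if_neg (by omega), if_neg (by omega)]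
    rw [hT', hv, refill_bit_eq_matFillN]
    have hdiv : bn / 2 < bn := Nat.div_lt_self hb (by omega)
    refine ⟨by rw [length_matFillN, ih1], ?_, ?_⟩
    · intro i; rw [rowLen_matFillN, ih2 i]
    · intro i j hi hj
      rw [cellN_matFillN _ _ _ _ _ _ _ (by rw [ih1]; exact hi)
        (by rw [ih2 i, hrowsM i hi]; exact hj)]
      by_cases hblk : bn * p ≤ i ∧ i < bn * p + bn ∧ bn * q ≤ j ∧ j < bn * q + bn
      · rw [if_pos hblk, if_neg (by omega), if_pos ⟨by omega, by omega⟩]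
        exact (tgt_block M bn i j p q (by omega) (by omega) (by omega) (by omega)).symm
      · rw [if_neg hblk, ih3 i j hi hj]
        by_cases h1 : i < bn * p
        · simp [h1]
        · rw [if_neg h1, if_neg h1]
          by_cases h2 : i < bn * (p + 1) ∧ j < bn * q
          · rw [if_pos h2, if_pos ⟨h2.1, by omega⟩]
          · by_cases h3 : i < bn * (p + 1) ∧ j < bn * (q + 1)
            · exact absurd ⟨by omega, by omega, by omega, by omega⟩ hblk
            · rw [if_neg h2, if_neg h3]

def outerFoldA (M : List (List Int)) (bn P : Nat) : List (List Int) :=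
  (List.range P).foldl (fun acc p =>
    (PySem.List.pyRange 0 (((PySem.List.pyGetD acc ((bn * p : Nat) : Int) []).length : Nat) : Int) (bn : Int)).foldl
      (fun acc2 c =>
        refill_bit acc2 (bn : Int) ((bn * p : Nat) : Int) c
          (pyCellGet acc2 (((bn * p : Nat) : Int) + PySem.Int.floordiv (bn : Int) 2)
            (c + PySem.Int.floordiv (bn : Int) 2))) acc) M

lemma refill_with_eq_outerFold (M : List (List Int)) (bn : Nat) (hb : 0 < bn)
    (hd : bn ∣ M.length) :
    refill_with_0_and_255 M (bn : Int) = outerFoldA M bn (M.length / bn) := by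
  unfold refill_with_0_and_255 outerFoldA
  rw [pyRange_step_natCast M.length bn hb hd, List.foldl_map]

lemma outer_fold_good (M : List (List Int)) (bn W P : Nat) (hb : 0 < bn)
    (hH : bn ∣ M.length) (hW : bn ∣ W)
    (hrowsM : ∀ i, i < M.length → (M.getD i []).length = W)
    (hP : P ≤ M.length / bn) :
    (outerFoldA M bn P).length = M.length ∧
    (∀ i, ((outerFoldA M bn P).getD i []).length = (M.getD i []).length) ∧
    (∀ i j, i < M.length → j < W → cellN (outerFoldA M bn P) i j =
      if i < bn * P then tgtN M bn i j else cellN M i j) := by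
  have hHlen : bn * (M.length / bn) = M.length := Nat.mul_div_cancel' hH
  have hWlen : bn * (W / bn) = W := Nat.mul_div_cancel' hW
  induction P with
  | zero =>
    refine ⟨rfl, fun i => rfl, ?_⟩
    intro i j hi hj
    rw [if_neg (by omega)]
    rfl
  | succ P ih =>
    have hbP : bn * (P + 1) ≤ M.length := by
      calc bn * (P + 1) ≤ bn * (M.length / bn) := Nat.mul_le_mul_left bn hP
        _ = M.length := hHlen
    have e1 : bn * (P + 1) = bn * P + bn := by ring
    obtain ⟨ih1, ih2, ih3⟩ := ih (by omega)
    have hrowW : (PySem.List.pyGetD (outerFoldA M bn P) ((bn * P : Nat) : Int) []).length = W := by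
      rw [PySem.List.pyGetD_natCast]
      rw [ih2 (bn * P), hrowsM (bn * P) (by omega)]
    have hstep0 : outerFoldA M bn (P + 1)
        = (PySem.List.pyRange 0 (((PySem.List.pyGetD (outerFoldA M bn P) ((bn * P : Nat) : Int) []).length : Nat) : Int) (bn : Int)).foldl
            (fun acc2 c => refill_bit acc2 (bn : Int) ((bn * P : Nat) : Int) c
              (pyCellGet acc2 (((bn * P : Nat) : Int) + PySem.Int.floordiv (bn : Int) 2)
                (c + PySem.Int.floordiv (bn : Int) 2)))
            (outerFoldA M bn P) := by
      conv_lhs => unfold outerFoldA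
      rw [List.range_succ, List.foldl_append, List.foldl_cons, List.foldl_nil]
      rfl
    rw [hrowW, pyRange_step_natCast W bn hb hW, List.foldl_map] at hstep0
    have hstep : outerFoldA M bn (P + 1) = innerFoldA (outerFoldA M bn P) bn (bn * P) (W / bn) := by
      rw [hstep0]; rfl
    obtain ⟨g1, g2, g3⟩ := inner_fold M (outerFoldA M bn P) bn P W (W / bn) hb hbP hrowsM
      (by omega) ih1 ih2 ih3
    rw [hstep]
    refine ⟨g1, g2, ?_⟩
    intro i j hi hj
    rw [g3 i j hi hj]
    by_cases h1 : i < bn * P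
    · rw [if_pos h1, if_pos (by omega)]
    · rw [if_neg h1]
      by_cases h2 : i < bn * (P + 1)
      · rw [if_pos ⟨h2, by omega⟩, if_pos h2]
      · rw [if_neg (by tauto), if_neg h2]

lemma fold_map_aux {α : Type} (g : α → α) (d : α) (post pre : List α) :
    (List.range' pre.length post.length).foldl
        (fun acc i => acc.set i (g (acc.getD i d))) (pre ++ post)
      = pre ++ post.map g := by
  induction post generalizing pre with
  | nil => simp
  | cons x xs ih =>
    rw [List.length_cons, List.range'_succ, List.foldl_cons]
    have hget : (pre ++ x :: xs).getD pre.length d = x := by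
      simp only [List.getD]
      rw [List.getElem?_append_right (Nat.le_refl _)]
      simp
    have hset : (pre ++ x :: xs).set pre.length (g x) = (pre ++ [g x]) ++ xs := by
      rw [List.set_append_right _ _ (Nat.le_refl _)]
      simp
    rw [hget, hset]
    have hlen : pre.length + 1 = (pre ++ [g x]).length := by simp
    rw [hlen, ih (pre ++ [g x])]
    simp

lemma crop_fold (g : List Int → List Int) (m : List (List Int)) :
    (PySem.List.pyRange 0 (m.length : Int) 1).foldl
        (fun acc i => PySem.List.pySetD acc i (g (PySem.List.pyGetD acc i []))) m
      = m.map g := by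
  rw [PySem.List.pyRange_zero_natCast, List.foldl_map]
  simp only [PySem.List.pyGetD_natCast, PySem.List.pySetD_natCast]
  have h := fold_map_aux g [] m []
  simpa [List.range_eq_range'] using h

lemma cellN_crop (m : List (List Int)) (H W i j : Nat) (hi : i < H) (hj : j < W) :
    cellN ((m.take H).map (fun row => row.take W)) i j = cellN m i j := by
  unfold cellN
  simp only [List.getD]
  rw [List.getElem?_map, List.getElem?_take_of_lt hi]
  cases hrow : m[i]? with
  | none => rfl
  | some row =>
    simp only [Option.map_some, Option.getD_some]
    rw [List.getElem?_take_of_lt hj]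

lemma refill_eq_canon (M : List (List Int)) (bn W : Nat) (hb : 0 < bn)
    (hH : bn ∣ M.length) (hW : bn ∣ W)
    (hrows : ∀ i, i < M.length → (M.getD i []).length = W) :
    refill_with_0_and_255 M (bn : Int)
      = (List.range M.length).map (fun i => (List.range W).map (fun j => tgtN M bn i j)) := by
  rw [refill_with_eq_outerFold M bn hb hH]
  obtain ⟨g1, g2, g3⟩ := outer_fold_good M bn W (M.length / bn) hb hH hW hrows (Nat.le_refl _)
  have hHlen : bn * (M.length / bn) = M.length := Nat.mul_div_cancel' hH
  apply List.ext_getElem (by rw [g1]; simp)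
  intro i h1 h2
  have hiM : i < M.length := by rw [g1] at h1; exact h1
  have hrowlen : ((outerFoldA M bn (M.length / bn)).getD i []).length = W := by
    rw [g2 i, hrows i hiM]
  have hroweq : (outerFoldA M bn (M.length / bn))[i]
      = (outerFoldA M bn (M.length / bn)).getD i [] :=
    (List.getD_eq_getElem _ [] h1).symm
  rw [List.getElem_map, List.getElem_range]
  apply List.ext_getElem (by rw [hroweq, hrowlen]; simp)
  intro j hj1 hj2
  have hjW : j < W := by rw [hroweq, hrowlen] at hj1; exact hj1
  have hcell := g3 i j hiM hjW
  rw [if_pos (by omega)] at hcell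
  have : (outerFoldA M bn (M.length / bn))[i][j]
      = cellN (outerFoldA M bn (M.length / bn)) i j := by
    unfold cellN
    rw [← hroweq, List.getD_eq_getElem _ 0 (by rw [← hroweq] at hrowlen; omega)]
  rw [this, hcell, List.getElem_map, List.getElem_range]

lemma center_lt (bn i H : Nat) (hb : 0 < bn) (hi : i < H) (hd : bn ∣ H) :
    i / bn * bn + bn / 2 < H := by
  have h1 : i / bn < H / bn := Nat.div_lt_div_of_lt_of_dvd hd hi
  have h2 : (i / bn + 1) * bn ≤ (H / bn) * bn := Nat.mul_le_mul_right bn h1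
  have h3 : (H / bn) * bn = H := Nat.div_mul_cancel hd
  have h4 : bn / 2 < bn := Nat.div_lt_self hb (by omega)
  have h5 : (i / bn + 1) * bn = i / bn * bn + bn := by ring
  omega

theorem resize_equiv_aux (m : List (List Int)) (b : Int)
    (hpre : Pre_resize_and_refill m b) :
    resize_and_refill m b = resize_and_refill_alt m b := by
  obtain ⟨hb1, hne, hrows⟩ := hpre
  lift b to Nat using (by omega) with bn
  have hb : 0 < bn := by exact_mod_cast hb1
  rw [Int.toNat_natCast] at hrows
  -- abbreviations
  have hhead : PySem.List.pyGetD m 0 [] = m.headD [] := by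
    cases m with
    | nil => exact absurd rfl hne
    | cons a l => rw [PySem.List.pyGetD_zero]; rfl
  set L0 := (m.headD []).length with hL0
  set H := m.length / bn * bn with hHdef
  set W := L0 / bn * bn with hWdef
  have hHle : H ≤ m.length := Nat.div_mul_le_self _ _
  have hdH : bn ∣ H := dvd_mul_left bn _
  have hdW : bn ∣ W := dvd_mul_left bn _
  have hheight : PySem.Int.floordiv (m.length : Int) (bn : Int) * (bn : Int) = ((H : Nat) : Int) := by
    rw [PySem.Int.floordiv_natCast, hHdef]; push_cast; ring
  have hwidth : PySem.Int.floordiv ((PySem.List.pyGetD m 0 []).length : Int) (bn : Int) * (bn : Int)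
      = ((W : Nat) : Int) := by
    rw [hhead, PySem.Int.floordiv_natCast, hWdef]; push_cast; ring
  have htakelen : (m.take H).length = H := by rw [List.length_take]; omega
  -- the cropped matrix
  set M := (m.take H).map (fun row => row.take W) with hMdef
  have hMlen : M.length = H := by rw [hMdef, List.length_map, htakelen]
  have hMrows : ∀ i, i < M.length → (M.getD i []).length = W := by
    intro i hi
    rw [hMlen] at hi
    have hi' : i < (m.take H).length := by omega
    have h1 : M.getD i [] = (m.take H)[i].take W := by
      simp only [List.getD]
      rw [hMdef, List.getElem?_map, List.getElem?_eq_getElem hi']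
      rfl
    have h2 : W ≤ (m.take H)[i].length := hrows _ (List.getElem_mem hi')
    rw [h1, List.length_take]
    omega
  -- A side
  show resize_and_refill m (bn : Int) = resize_and_refill_alt m (bn : Int)
  have hA : resize_and_refill m (bn : Int)
      = (List.range H).map (fun i => (List.range W).map (fun j => tgtN M bn i j)) := by
    unfold resize_and_refill
    simp only [hheight, hwidth]
    rw [PySem.List.slice_to_natCast]
    rw [show ((H : Nat) : Int) = (((m.take H).length : Nat) : Int) by rw [htakelen]]
    rw [crop_fold (fun row => PySem.List.slice row none (some ((W : Nat) : Int))) (m.take H)]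
    have hg : (m.take H).map (fun row => PySem.List.slice row none (some ((W : Nat) : Int)))
        = M := by
      rw [hMdef]
      apply List.map_congr_left
      intro row _
      rw [PySem.List.slice_to_natCast]
    rw [hg, refill_eq_canon M bn W hb (by rw [hMlen]; exact hdH) hdW hMrows, hMlen]
  -- B side
  have hB : resize_and_refill_alt m (bn : Int)
      = (List.range H).map (fun i => (List.range W).map (fun j =>
          cellN m (i / bn * bn + bn / 2) (j / bn * bn + bn / 2))) := by
    unfold resize_and_refill_alt
    simp only [hheight, hwidth, PySem.List.pyRange_zero_natCast, List.map_map]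
    apply List.map_congr_left
    intro i _
    simp only [Function.comp_apply]
    apply List.map_congr_left
    intro j _
    simp only [Function.comp_apply]
    rw [half_natCast, PySem.Int.floordiv_natCast, PySem.Int.floordiv_natCast]
    rw [show ((i / bn : Nat) : Int) * ((bn : Nat) : Int) + ((bn / 2 : Nat) : Int)
        = ((i / bn * bn + bn / 2 : Nat) : Int) by push_cast; ring]
    rw [show ((j / bn : Nat) : Int) * ((bn : Nat) : Int) + ((bn / 2 : Nat) : Int)
        = ((j / bn * bn + bn / 2 : Nat) : Int) by push_cast; ring]
    rw [PySem.List.pyGetD_natCast, PySem.List.pyGetD_natCast]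
    rfl
  rw [hA, hB]
  apply List.map_congr_left
  intro i hi
  apply List.map_congr_left
  intro j hj
  rw [List.mem_range] at hi hj
  unfold tgtN
  exact cellN_crop m H W _ _ (center_lt bn i H hb hi hdH) (center_lt bn j W hb hj hdW)

-- ===== VERDICT (by name: the statement is the Claim_ definition above) =====
theorem resize_and_refill_spec : Claim_equal_resize_and_refill := by
  intro image_matrix bit_length _ hpre
  unfold Spec_resize_and_refill
  exact resize_equiv_aux image_matrix bit_length hpre
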